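-- pv_equiv track=rewrite | github.com/CodecoolGlobal/roguelike-game-python-WonkeTomi | ui.py | text_to_list
-- ===== SOURCE A (Python) =====
-- def text_to_list(text):
--     output = []
--     i = 0
--     line = ''
--     while i < len(text):
--         if text[i] != '\n':
--             line += text[i]
--         else:
--             output.append(line)
--             line = ''
--         i += 1
--     output.append(line)
--     return output
-- ===== SOURCE B (Python) =====
-- def text_to_list(text):
--     output = []
--     start = 0
--     while True:
--         idx = text.find('\n', start)
--         if idx == -1:
--             output.append(text[start:])
--             return output
--         output.append(text[start:idx])
--         start = idx + 1
-- ===== Notes on version B (the rewrite author's own statement) =====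
-- stated objective: faster
-- what changed: B replaces the char-by-char accumulator loop with a find-and-slice loop: it searches for the next newline with str.find and slices out whole segments, avoiding A's per-character string concatenation.
import Mathlib
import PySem

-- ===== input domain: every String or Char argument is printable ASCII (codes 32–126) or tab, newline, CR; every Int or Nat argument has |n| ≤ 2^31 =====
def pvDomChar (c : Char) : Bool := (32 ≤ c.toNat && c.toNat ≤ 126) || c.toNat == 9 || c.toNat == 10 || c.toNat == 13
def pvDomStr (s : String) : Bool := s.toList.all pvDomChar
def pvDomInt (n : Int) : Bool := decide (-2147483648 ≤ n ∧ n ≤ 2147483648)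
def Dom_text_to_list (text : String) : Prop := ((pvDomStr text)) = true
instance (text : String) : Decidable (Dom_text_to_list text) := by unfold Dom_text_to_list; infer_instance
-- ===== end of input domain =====

-- B replaces A's char-by-char accumulator loop with a find-and-slice loop (search for the
-- next '\n', slice out the whole segment); same return value, more idiomatic.

-- ===== PORT A =====
-- A walks the text one character at a time, growing `line` and flushing it at each '\n'.
def goA : List Char → List String → List Char → List String
  | [], out, line => out ++ [String.ofList line]
  | c :: rest, out, line =>
    if c ≠ '\n' then goA rest out (line ++ [c])
    else goA rest (out ++ [String.ofList line]) []

def text_to_list (text : String) : List String := goA text.toList [] []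

-- ===== PORT B =====
-- B finds the index of the next '\n' (Python's text.find('\n', start)); if none, the rest
-- is the last line; otherwise the slice before it is a line and the search continues after it.
def goB (cs : List Char) : List String :=
  match h : cs.findIdx? (· == '\n') with
  | none => [String.ofList cs]
  | some i => String.ofList (cs.take i) :: goB (cs.drop (i + 1))
termination_by cs.length
decreasing_by
  have hne : cs ≠ [] := by intro hnil; subst hnil; simp at h
  have : 0 < cs.length := List.length_pos_iff.mpr hne
  simp [List.length_drop]; omega

def text_to_list_alt (text : String) : List String := goB text.toList

-- ===== PRECONDITION & SPEC =====
def Spec_text_to_list (text : String) (out : List String) : Prop := out = text_to_list_alt text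
instance (text : String) (out : List String) : Decidable (Spec_text_to_list text out) := by unfold Spec_text_to_list; infer_instance

-- ===== CLAIM (what is proved, stated in full; the proofs are below) =====
def Claim_equal_text_to_list : Prop := ∀ (text : String), Dom_text_to_list text → Spec_text_to_list text (text_to_list text)

-- ===== LEMMAS AND PROOFS =====
lemma goB_no_nl (cs : List Char) (h : '\n' ∉ cs) : goB cs = [String.ofList cs] := by
  have hf : cs.findIdx? (· == '\n') = none := by
    rw [List.findIdx?_eq_none_iff]
    intro x hx
    simp only [beq_eq_false_iff_ne]
    exact fun he => h (he ▸ hx)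
  rw [goB, hf]

lemma goB_some (cs : List Char) (i : Nat) (hf : cs.findIdx? (· == '\n') = some i) :
    goB cs = String.ofList (cs.take i) :: goB (cs.drop (i + 1)) := by
  rw [goB, hf]

lemma findIdx_nl (pre rest : List Char) (h : '\n' ∉ pre) :
    (pre ++ '\n' :: rest).findIdx? (· == '\n') = some pre.length := by
  induction pre with
  | nil => simp [List.findIdx?_cons]
  | cons c cs ih =>
    have hc : (c == '\n') = false := by
      simp only [beq_eq_false_iff_ne]
      intro he; exact h (he ▸ List.mem_cons_self)
    have ih' := ih (fun hm => h (List.mem_cons_of_mem _ hm))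
    simp [List.findIdx?_cons, hc, ih']

lemma goB_nl (pre rest : List Char) (h : '\n' ∉ pre) :
    goB (pre ++ '\n' :: rest) = String.ofList pre :: goB rest := by
  rw [goB_some _ pre.length (findIdx_nl pre rest h)]
  have h1 : (pre ++ '\n' :: rest).take pre.length = pre := List.take_left
  have h2 : (pre ++ '\n' :: rest).drop (pre.length + 1) = rest := by simp
  rw [h1, h2]

lemma goA_eq (cs : List Char) : ∀ (out : List String) (line : List Char),
    '\n' ∉ line → goA cs out line = out ++ goB (line ++ cs) := by
  induction cs with
  | nil =>
    intro out line h
    simp [goA, goB_no_nl line h]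
  | cons c rest ih =>
    intro out line h
    by_cases hc : c = '\n'
    · subst hc
      have hstep : goA ('\n' :: rest) out line = goA rest (out ++ [String.ofList line]) [] := by
        simp [goA]
      rw [hstep, ih (out ++ [String.ofList line]) [] (by simp), goB_nl line rest h]
      simp
    · have hstep : goA (c :: rest) out line = goA rest out (line ++ [c]) := by
        simp [goA, hc]
      have hline : '\n' ∉ line ++ [c] := by
        intro hm
        rcases List.mem_append.mp hm with h1 | h2
        · exact h h1
        · exact hc (List.mem_singleton.mp h2).symm
      rw [hstep, ih out (line ++ [c]) hline]
      simp

-- ===== VERDICT (by name: the statement is the Claim_ definition above) =====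
theorem text_to_list_spec : Claim_equal_text_to_list := by
  intro text _
  unfold Spec_text_to_list text_to_list text_to_list_alt
  simpa using goA_eq text.toList [] [] (by simp)
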